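-- pv_equiv track=rewrite | github.com/pemn/tri_3d_drillhole | pd_vtk.py | vtk_cells_to_flat
-- ===== SOURCE A (Python) =====
-- def vtk_cells_to_flat(cells):
--   r = []
--   p = 0
--   while p < len(cells):
--     n = cells[p]
--     r.extend(cells[p+1:p+1+n])
--     p += n + 1
--   return r
-- ===== SOURCE B (Python) =====
-- def vtk_cells_to_flat(cells):
--   # streaming state machine: remaining == 0 means the next element is a cell
--   # count, otherwise it is payload
--   r = []
--   remaining = 0
--   for x in cells:
--     if remaining == 0:
--       remaining = x
--     else:
--       r.append(x)
--       remaining -= 1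
--   return r
-- ===== Notes on version B (the rewrite author's own statement) =====
-- stated objective: simpler
-- what changed: Replaced A's index-jumping while loop with per-cell slice extension by a single streaming for-loop over the elements that keeps one 'remaining payload' counter, so there is no index arithmetic or slicing at all.
-- outside the precondition, e.g. on vtk_cells_to_flat([-3, 167, 2, 2, -3]): A returns [167, 2, 2, 2, -3], B returns [167, 2, 2, -3]; on vtk_cells_to_flat([2, -1, -2]): A returns [-1, -2], B returns [-1, -2]; on vtk_cells_to_flat([-1]): A does not finish within the time limit, B returns []
import Mathlib
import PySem

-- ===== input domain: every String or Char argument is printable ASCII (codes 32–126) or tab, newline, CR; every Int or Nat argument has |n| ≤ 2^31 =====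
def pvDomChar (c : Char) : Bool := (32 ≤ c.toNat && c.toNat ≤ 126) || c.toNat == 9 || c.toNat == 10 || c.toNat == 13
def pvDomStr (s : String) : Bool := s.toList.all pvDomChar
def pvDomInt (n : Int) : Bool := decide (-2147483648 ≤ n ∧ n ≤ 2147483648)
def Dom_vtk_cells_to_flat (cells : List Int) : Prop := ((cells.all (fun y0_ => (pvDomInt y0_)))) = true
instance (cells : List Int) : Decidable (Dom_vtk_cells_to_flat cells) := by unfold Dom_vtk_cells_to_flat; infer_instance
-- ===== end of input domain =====

-- B replaces A's index-jumping slice loop by a single streaming pass with a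
-- 'remaining payload' counter (objective: simpler; same O(n) cost).


-- ===== PORT A =====
-- while p < len(cells): n = cells[p]; r.extend(cells[p+1:p+1+n]); p += n+1
-- fuel = cells.length is a pure termination guard: inside Pre_ every count is
-- ≥ 0, so p strictly increases and the loop runs at most cells.length times.
def vtk_cells_to_flat_goA (cells : List Int) : Nat → Int → List Int
  | 0, _ => []
  | f + 1, p =>
    if p < (cells.length : Int) then
      let n := (PySem.List.pyGet? cells p).getD 0
      PySem.List.slice cells (some (p + 1)) (some (p + 1 + n)) ++
        vtk_cells_to_flat_goA cells f (p + n + 1)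
    else []

def vtk_cells_to_flat (cells : List Int) : List Int :=
  vtk_cells_to_flat_goA cells cells.length 0

-- ===== PORT B =====
-- streaming state machine: remaining = 0 ⇒ next element is a count,
-- otherwise it is payload
def vtk_cells_to_flat_goB : List Int → Int → List Int
  | [], _ => []
  | x :: xs, remaining =>
    if remaining == 0 then vtk_cells_to_flat_goB xs x
    else x :: vtk_cells_to_flat_goB xs (remaining - 1)

def vtk_cells_to_flat_alt (cells : List Int) : List Int :=
  vtk_cells_to_flat_goB cells 0

-- ===== PRECONDITION & SPEC =====
-- Pre_ excludes lists containing a negative entry: a negative value read as a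
-- cell count makes A non-terminate or (via Python's negative slice/index
-- wraparound) return an accidental re-read of earlier elements, and which
-- positions are counts is not a closed-form property of the list; the
-- condition therefore also (narrowly) excludes lists whose negatives are all
-- in payload positions, on which A returns and B agrees with it.
def Pre_vtk_cells_to_flat (cells : List Int) : Prop := ∀ x ∈ cells, 0 ≤ x
instance (cells : List Int) : Decidable (Pre_vtk_cells_to_flat cells) := by
  unfold Pre_vtk_cells_to_flat; infer_instance
def pvWitness_vtk_cells_to_flat : List Int := [2, 5, 7, 0, 3, 1, 2, 9]

def Spec_vtk_cells_to_flat (cells : List Int) (out : List Int) : Prop := out = vtk_cells_to_flat_alt cells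
instance (cells : List Int) (out : List Int) : Decidable (Spec_vtk_cells_to_flat cells out) := by unfold Spec_vtk_cells_to_flat; infer_instance

-- ===== CLAIM (what is proved, stated in full; the proofs are below) =====
def Claim_equal_vtk_cells_to_flat : Prop := ∀ (cells : List Int), Dom_vtk_cells_to_flat cells → Pre_vtk_cells_to_flat cells → Spec_vtk_cells_to_flat cells (vtk_cells_to_flat cells)

-- ===== LEMMAS AND PROOFS =====

-- In payload mode with n items to consume, B copies n items then reverts to
-- count mode (past-the-end counts just exhaust the list, like A's slice).
lemma goB_take (n : Nat) : ∀ ys : List Int,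
    vtk_cells_to_flat_goB ys (n : Int) =
      ys.take n ++ vtk_cells_to_flat_goB (ys.drop n) 0 := by
  induction n with
  | zero => intro ys; simp
  | succ n ih =>
    intro ys
    cases ys with
    | nil => simp [vtk_cells_to_flat_goB]
    | cons y t =>
      have hne : (((n + 1 : Nat) : Int) == 0) = false := by
        simp; omega
      simp only [vtk_cells_to_flat_goB, hne]
      have : ((n + 1 : Nat) : Int) - 1 = (n : Int) := by push_cast; ring
      rw [this, ih]
      simp

lemma goA_eq_goB (cells : List Int) (hpre : ∀ x ∈ cells, 0 ≤ x) :
    ∀ (fuel : Nat) (p : Nat), cells.length ≤ p + fuel →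
      vtk_cells_to_flat_goA cells fuel (p : Int) =
        vtk_cells_to_flat_goB (cells.drop p) 0 := by
  intro fuel
  induction fuel with
  | zero =>
    intro p hle
    have : cells.drop p = [] := List.drop_eq_nil_of_le (by omega)
    simp [vtk_cells_to_flat_goA, this, vtk_cells_to_flat_goB]
  | succ f ih =>
    intro p hle
    by_cases hp : p < cells.length
    · have hget : (PySem.List.pyGet? cells (p : Int)).getD 0 = cells[p] := by
        simp [PySem.List.pyGet?_natCast, List.getElem?_eq_getElem hp]
      have hn0 : 0 ≤ cells[p] := hpre _ (List.getElem_mem hp)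
      set m : Nat := (cells[p]).toNat with hm
      have hcast : cells[p] = (m : Int) := by omega
      have hdrop : cells.drop p = cells[p] :: cells.drop (p + 1) :=
        List.drop_eq_getElem_cons hp
      have hslice : PySem.List.slice cells (some ((p : Int) + 1))
          (some ((p : Int) + 1 + cells[p])) = (cells.drop (p + 1)).take m := by
        rw [hcast]
        have h1 : ((p : Int) + 1) = ((p + 1 : Nat) : Int) := by push_cast; ring
        rw [h1, PySem.List.slice_natCast_add]
      have hrec : vtk_cells_to_flat_goA cells f ((p : Int) + cells[p] + 1) =
          vtk_cells_to_flat_goB (cells.drop (p + 1 + m)) 0 := by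
        have h2 : ((p : Int) + cells[p] + 1) = ((p + 1 + m : Nat) : Int) := by
          rw [hcast]; push_cast; ring
        rw [h2, ih (p + 1 + m) (by omega)]
      simp only [vtk_cells_to_flat_goA, hget, hslice, hrec, hdrop,
        vtk_cells_to_flat_goB, beq_self_eq_true, if_true]
      rw [hcast, goB_take m (cells.drop (p + 1)), List.drop_drop,
        if_pos (show ((p : Int) < (cells.length : Int)) by exact_mod_cast hp)]
    · have hnil : cells.drop p = [] := List.drop_eq_nil_of_le (by omega)
      have : ¬ ((p : Int) < (cells.length : Int)) := by exact_mod_cast hp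
      simp [vtk_cells_to_flat_goA, this, hnil, vtk_cells_to_flat_goB]

-- ===== VERDICT (by name: the statement is the Claim_ definition above) =====
theorem vtk_cells_to_flat_spec : Claim_equal_vtk_cells_to_flat := by
  intro cells _ hpre
  show vtk_cells_to_flat cells = vtk_cells_to_flat_alt cells
  unfold vtk_cells_to_flat vtk_cells_to_flat_alt
  have h := goA_eq_goB cells hpre cells.length 0 (by omega)
  simpa using h
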